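-- pv_equiv track=rewrite | github.com/trzy/robot-arm | act/utils.py | produce_episode_start_indices
-- ===== SOURCE A (Python) =====
-- def produce_episode_start_indices(total_data_length: int, episode_length: int):
--     indices = []
--     idx = -episode_length
--     while True:
--         # Try to advance but if the episode we woudl produce exceeds total data length, need to shift
--         # back to accommodate and produce a final, overlapping chunk
--         new_idx = min(idx + episode_length, total_data_length - episode_length)
--         if new_idx == idx:
--             break
--         idx = new_idx
--         indices.append(idx)
--     return indices
-- ===== SOURCE B (Python) =====
-- def produce_episode_start_indices(total_data_length: int, episode_length: int):
--     # Closed-form: bulk starts by range(), plus one final (possibly overlapping) chunk start.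
--     if episode_length == 0 or total_data_length == 0:
--         return []
--     last = total_data_length - episode_length
--     return list(range(0, last, episode_length)) + [last]
-- ===== Notes on version B (the rewrite author's own statement) =====
-- stated objective: simpler
-- what changed: Replaces A's while-loop with per-step min-clamping by a direct range(0, last, episode_length) plus one appended final start index; degenerate cases are a single guard.
-- intended difference: For episode_length == 0 with total_data_length < 0, A's leftover loop state returns [total_data_length] while B returns [], the intended value since zero-length episodes yield no start indices (A already returns [] for episode_length == 0 with nonnegative data length). — e.g. on produce_episode_start_indices(-3, 0): A returns [-3], B returns []
import Mathlib
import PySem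

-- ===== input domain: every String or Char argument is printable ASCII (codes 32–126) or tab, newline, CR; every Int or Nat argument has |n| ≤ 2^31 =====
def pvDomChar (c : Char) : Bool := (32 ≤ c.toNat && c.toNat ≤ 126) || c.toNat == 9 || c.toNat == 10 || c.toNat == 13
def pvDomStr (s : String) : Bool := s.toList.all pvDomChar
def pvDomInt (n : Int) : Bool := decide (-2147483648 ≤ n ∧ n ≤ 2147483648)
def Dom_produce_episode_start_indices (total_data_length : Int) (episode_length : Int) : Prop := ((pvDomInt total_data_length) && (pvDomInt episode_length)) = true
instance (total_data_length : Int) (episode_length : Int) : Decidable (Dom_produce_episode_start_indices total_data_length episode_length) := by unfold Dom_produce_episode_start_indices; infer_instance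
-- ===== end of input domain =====

-- B replaces A's clamped while-loop by a direct range plus one appended final start (simpler);
-- Pre_ excludes episode_length < 0, where Python A loops forever; D_ marks the corner where A's
-- leftover loop state returns [total_data_length] and B returns the intended [].


-- ===== PORT A =====
-- The while-loop of A, as recursion on the clamped distance to the last start index.
-- The `episode_length < 0` branch is only a totality guard: there the Python loop never
-- terminates (outside Pre_); for 0 ≤ episode_length the recursion follows A step for step.
def pvA_loop (total_data_length episode_length idx : Int) (indices : List Int) : List Int :=
  if min (idx + episode_length) (total_data_length - episode_length) = idx then indices
  else if episode_length < 0 then indices  -- Python diverges here; excluded by Pre_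
  else pvA_loop total_data_length episode_length
         (min (idx + episode_length) (total_data_length - episode_length))
         (indices ++ [min (idx + episode_length) (total_data_length - episode_length)])
termination_by (total_data_length - episode_length - idx).toNat + (if total_data_length - episode_length < idx then 1 else 0)
decreasing_by
  simp only [min_def] at *
  split_ifs at * <;> omega

def produce_episode_start_indices (total_data_length : Int) (episode_length : Int) : List Int :=
  pvA_loop total_data_length episode_length (-episode_length) []

-- ===== PORT B =====
def produce_episode_start_indices_alt (total_data_length : Int) (episode_length : Int) : List Int :=
  if episode_length = 0 ∨ total_data_length = 0 then []
  else PySem.List.pyRange 0 (total_data_length - episode_length) episode_length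
       ++ [total_data_length - episode_length]

-- ===== PRECONDITION & SPEC =====
-- Pre_ excludes exactly episode_length < 0, on which Python A loops forever (no return).
def Pre_produce_episode_start_indices (total_data_length : Int) (episode_length : Int) : Prop :=
  0 ≤ episode_length
instance (total_data_length : Int) (episode_length : Int) : Decidable (Pre_produce_episode_start_indices total_data_length episode_length) := by unfold Pre_produce_episode_start_indices; infer_instance

def pvWitness_produce_episode_start_indices : Int × Int := (10, 3)

-- For episode_length = 0 with total_data_length < 0, A's leftover loop state returns
-- [total_data_length] while B returns [], the intended value: zero-length episodes yield no
-- start indices (A itself returns [] for episode_length = 0 with nonnegative data length).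
def D_produce_episode_start_indices (total_data_length : Int) (episode_length : Int) : Prop :=
  episode_length = 0 ∧ total_data_length < 0
instance (total_data_length : Int) (episode_length : Int) : Decidable (D_produce_episode_start_indices total_data_length episode_length) := by unfold D_produce_episode_start_indices; infer_instance

def Spec_produce_episode_start_indices (total_data_length : Int) (episode_length : Int) (out : List Int) : Prop := ¬ D_produce_episode_start_indices total_data_length episode_length → out = produce_episode_start_indices_alt total_data_length episode_length
instance (total_data_length : Int) (episode_length : Int) (out : List Int) : Decidable (Spec_produce_episode_start_indices total_data_length episode_length out) := by unfold Spec_produce_episode_start_indices; infer_instance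

def pvDiffWitness_produce_episode_start_indices : Int × Int := (-3, 0)
def pvDiffWitnessOut_produce_episode_start_indices : (List Int) × (List Int) := ([-3], [])

-- ===== CLAIM (what is proved, stated in full; the proofs are below) =====
def Claim_unchanged_produce_episode_start_indices : Prop := ∀ (total_data_length : Int) (episode_length : Int), Dom_produce_episode_start_indices total_data_length episode_length → Pre_produce_episode_start_indices total_data_length episode_length → Spec_produce_episode_start_indices total_data_length episode_length (produce_episode_start_indices total_data_length episode_length)
def Claim_changed_produce_episode_start_indices : Prop := Dom_produce_episode_start_indices (pvDiffWitness_produce_episode_start_indices.1) (pvDiffWitness_produce_episode_start_indices.2) ∧ Pre_produce_episode_start_indices (pvDiffWitness_produce_episode_start_indices.1) (pvDiffWitness_produce_episode_start_indices.2) ∧ D_produce_episode_start_indices (pvDiffWitness_produce_episode_start_indices.1) (pvDiffWitness_produce_episode_start_indices.2) ∧ produce_episode_start_indices (pvDiffWitness_produce_episode_start_indices.1) (pvDiffWitness_produce_episode_start_indices.2) = pvDiffWitnessOut_produce_episode_start_indices.1 ∧ produce_episode_start_indices_alt (pvDiffWitness_produce_episode_start_indices.1) (pvDiffWitness_produce_episode_start_indices.2)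 = pvDiffWitnessOut_produce_episode_start_indices.2 ∧ pvDiffWitnessOut_produce_episode_start_indices.1 ≠ pvDiffWitnessOut_produce_episode_start_indices.2
def Claim_exact_produce_episode_start_indices : Prop := ∀ (total_data_length : Int) (episode_length : Int), Dom_produce_episode_start_indices total_data_length episode_length → Pre_produce_episode_start_indices total_data_length episode_length → D_produce_episode_start_indices total_data_length episode_length → produce_episode_start_indices total_data_length episode_length ≠ produce_episode_start_indices_alt total_data_length episode_length

-- ===== LEMMAS AND PROOFS =====

-- range with positive step peels its head element
theorem pvPyRange_pos_cons (a b s : Int) (hs : 0 < s) (hab : a < b) :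
    PySem.List.pyRange a b s = a :: PySem.List.pyRange (a + s) b s := by
  rw [PySem.List.pyRange_of_pos _ _ hs, PySem.List.pyRange_of_pos _ _ hs]
  rw [if_pos hab]
  by_cases h2 : a + s < b
  · rw [if_pos h2]
    have hn : ((b - a + s - 1) / s).toNat = ((b - (a + s) + s - 1) / s).toNat + 1 := by
      have key : (b - (a + s) + s - 1 + s) / s = (b - (a + s) + s - 1) / s + 1 := by
        have := Int.add_mul_ediv_right (b - (a + s) + s - 1) 1 hs.ne'
        simpa using this
      have e : b - a + s - 1 = b - (a + s) + s - 1 + s := by ring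
      rw [e, key]
      have hpos : 0 ≤ (b - (a + s) + s - 1) / s := Int.ediv_nonneg (by omega) hs.le
      omega
    rw [hn, List.range_succ_eq_map, List.map_cons, List.map_map]
    refine congrArg₂ _ (by push_cast; ring) ?_
    apply List.map_congr_left
    intro k _
    simp only [Function.comp_apply]
    push_cast
    ring
  · rw [if_neg h2]
    have h3 : 1 ≤ (b - a + s - 1) / s := by
      rw [Int.le_ediv_iff_mul_le hs]; omega
    have h4 : (b - a + s - 1) / s < 2 := by
      rw [Int.ediv_lt_iff_lt_mul hs]; omega
    have hn : ((b - a + s - 1) / s).toNat = 1 := by omega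
    simp [hn]

theorem pvPyRange_pos_nil (a b s : Int) (hs : 0 < s) (hab : b ≤ a) :
    PySem.List.pyRange a b s = [] := by
  rw [PySem.List.pyRange_of_pos _ _ hs, if_neg (by omega)]
  simp

-- Characterisation of A's loop for a positive step, started at idx ≤ total - episode.
theorem pvA_loop_char (T L : Int) (hL : 0 < L) :
    ∀ (n : Nat) (idx : Int), (T - L - idx).toNat = n → idx ≤ T - L → ∀ (acc : List Int),
      pvA_loop T L idx acc =
        acc ++ PySem.List.pyRange (idx + L) (T - L) L ++ (if idx = T - L then [] else [T - L]) := by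
  intro n
  induction n using Nat.strong_induction_on with
  | _ n ih =>
    intro idx hn hidx acc
    rw [pvA_loop]
    by_cases hbrk : min (idx + L) (T - L) = idx
    · have heq : idx = T - L := by omega
      rw [if_pos hbrk, heq]
      rw [pvPyRange_pos_nil _ _ _ hL (by omega)]
      simp
    · rw [if_neg hbrk, if_neg (by omega)]
      have hlt : idx < T - L := by omega
      rcases lt_or_ge (idx + L) (T - L) with hc | hc
      · rw [min_eq_left hc.le]
        rw [ih (T - L - (idx + L)).toNat (by omega) (idx + L) rfl hc.le (acc ++ [idx + L])]
        rw [pvPyRange_pos_cons (idx + L) (T - L) L hL hc]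
        rw [if_neg (by omega : ¬ idx = T - L), if_neg (by omega : ¬ idx + L = T - L)]
        simp
      · rw [min_eq_right hc]
        rw [ih (T - L - (T - L)).toNat (by omega) (T - L) rfl le_rfl (acc ++ [T - L])]
        rw [if_pos rfl, if_neg (by omega : ¬ idx = T - L)]
        rw [pvPyRange_pos_nil (T - L + L) (T - L) L hL (by omega),
            pvPyRange_pos_nil (idx + L) (T - L) L hL (by omega)]
        simp

-- ===== VERDICT (by name: the statement is the Claim_ definition above) =====
theorem produce_episode_start_indices_spec : Claim_unchanged_produce_episode_start_indices := by
  intro T L _ hPre hD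
  unfold Pre_produce_episode_start_indices at hPre
  unfold D_produce_episode_start_indices at hD
  unfold produce_episode_start_indices produce_episode_start_indices_alt
  rcases lt_or_eq_of_le hPre with hL | hL0
  · -- 0 < L
    by_cases hT0 : T = 0
    · subst hT0
      rw [pvA_loop, if_pos (by omega), if_pos (by right; rfl)]
    · by_cases hTpos : 0 ≤ T
      · rw [pvA_loop_char T L hL (T - L - (-L)).toNat (-L) rfl (by omega) []]
        rw [if_neg (by omega : ¬ (-L : Int) = T - L),
            if_neg (by push_neg; exact ⟨by omega, hT0⟩)]
        have : (-L : Int) + L = 0 := by omega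
        rw [this]
        simp
      · -- T < 0 : A appends the single clamped start T - L and stops
        push_neg at hTpos
        rw [pvA_loop, if_neg (by omega), if_neg (by omega)]
        have hm : min (-L + L) (T - L) = T - L := by omega
        rw [hm, pvA_loop, if_pos (by omega)]
        rw [if_neg (by push_neg; exact ⟨by omega, hT0⟩)]
        rw [pvPyRange_pos_nil 0 (T - L) L hL (by omega)]
  · -- L = 0, and ¬D gives 0 ≤ T
    have hT : 0 ≤ T := by
      by_contra h; exact hD ⟨hL0.symm, by omega⟩
    rw [← hL0]
    rw [pvA_loop, if_pos (by omega), if_pos (by left; rfl)]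

theorem produce_episode_start_indices_changed : Claim_changed_produce_episode_start_indices := by
  unfold Claim_changed_produce_episode_start_indices
  refine ⟨by decide, by decide, by decide, ?_, by decide, by decide⟩
  show produce_episode_start_indices (-3) 0 = [-3]
  unfold produce_episode_start_indices
  rw [pvA_loop, if_neg (by omega), if_neg (by omega)]
  rw [pvA_loop, if_pos (by omega)]
  norm_num

theorem produce_episode_start_indices_tight : Claim_exact_produce_episode_start_indices := by
  intro T L _ _ hD
  obtain ⟨hL0, hT⟩ := hD
  subst hL0
  unfold produce_episode_start_indices produce_episode_start_indices_alt
  rw [pvA_loop, if_neg (by omega), if_neg (by omega)]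
  rw [pvA_loop, if_pos (by omega)]
  rw [if_pos (by left; rfl)]
  simp
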